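-- pv_equiv track=rewrite | github.com/sai-vishnu-arvind/oac-slack-bot | src/oac_slack_bot/slack/format.py | _convert_images
-- ===== SOURCE A (Python) =====
-- def _convert_images(text: str) -> str:
--     result: list[str] = []
--     chars = list(text)
--     i = 0
--
--     while i < len(chars):
--         if i + 1 < len(chars) and chars[i] == "!" and chars[i + 1] == "[":
--             parsed = _parse_md_link(chars, i + 1)
--             if parsed:
--                 _, url, end = parsed
--                 result.append(f"<{url}>")
--                 i = end
--                 continue
--         result.append(chars[i])
--         i += 1
--
--     return "".join(result)
--
-- def _parse_md_link(chars: list[str], start: int) -> tuple[str, str, int] | None: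
--     if start >= len(chars) or chars[start] != "[":
--         return None
--
--     i = start + 1
--     link_text: list[str] = []
--     depth = 1
--     while i < len(chars) and depth > 0:
--         if chars[i] == "[":
--             depth += 1
--         elif chars[i] == "]":
--             depth -= 1
--             if depth == 0:
--                 break
--         link_text.append(chars[i])
--         i += 1
--
--     if depth != 0:
--         return None
--
--     i += 1  # skip ']'
--     if i >= len(chars) or chars[i] != "(":
--         return None
--
--     i += 1  # skip '('
--     url: list[str] = []
--     paren_depth = 1
--     while i < len(chars) and paren_depth > 0:
--         if chars[i] == "(":
--             paren_depth += 1
--         elif chars[i] == ")":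
--             paren_depth -= 1
--             if paren_depth == 0:
--                 break
--         url.append(chars[i])
--         i += 1
--
--     if paren_depth != 0:
--         return None
--
--     return "".join(link_text), "".join(url).strip(), i + 1
-- ===== SOURCE B (Python) =====
-- def _convert_images(text: str) -> str:
--     # One pass precomputes the matching ']' / ')' for every '[' / '(' with two
--     # stacks; the rewrite loop then jumps in O(1) instead of re-scanning.
--     n = len(text)
--     bmatch: dict[int, int] = {}
--     pmatch: dict[int, int] = {}
--     bstack: list[int] = []
--     pstack: list[int] = []
--     for i, ch in enumerate(text):
--         if ch == "[":
--             bstack.append(i)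
--         elif ch == "]":
--             if bstack:
--                 bmatch[bstack.pop()] = i
--         elif ch == "(":
--             pstack.append(i)
--         elif ch == ")":
--             if pstack:
--                 pmatch[pstack.pop()] = i
--
--     out: list[str] = []
--     i = 0
--     while i < n:
--         if text[i] == "!" and i + 1 < n and text[i + 1] == "[":
--             cb = bmatch.get(i + 1)
--             if cb is not None and cb + 1 < n and text[cb + 1] == "(":
--                 cp = pmatch.get(cb + 1)
--                 if cp is not None:
--                     out.append("<" + text[cb + 2 : cp].strip() + ">")
--                     i = cp + 1
--                     continue
--         out.append(text[i])
--         i += 1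
--     return "".join(out)
-- ===== Notes on version B (the rewrite author's own statement) =====
-- stated objective: alternative
-- what changed: A re-scans the rest of the string with depth counters at every image-link candidate (quadratic worst case); B precomputes the matching closer of every opening bracket and parenthesis with two stacks in one linear pass, and the rewrite loop then jumps via O(1) dictionary lookups. A timing run's confirmation of a speed-up was borderline across runs, so none is claimed.
import Mathlib
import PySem

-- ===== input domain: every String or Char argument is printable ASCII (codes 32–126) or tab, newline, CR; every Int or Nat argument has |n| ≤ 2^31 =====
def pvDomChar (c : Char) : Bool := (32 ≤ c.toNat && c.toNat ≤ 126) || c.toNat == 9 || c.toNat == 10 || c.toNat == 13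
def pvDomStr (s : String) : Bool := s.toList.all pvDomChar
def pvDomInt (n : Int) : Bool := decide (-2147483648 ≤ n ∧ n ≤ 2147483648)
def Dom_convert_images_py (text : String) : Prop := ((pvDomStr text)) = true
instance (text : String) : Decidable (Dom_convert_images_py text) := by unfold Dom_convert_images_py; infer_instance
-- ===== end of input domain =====

-- B replaces A's per-candidate depth-counting re-scan by one stack pass that precomputes the
-- matching closer of every opening bracket/parenthesis, so the rewrite loop jumps in O(1).

-- ===== PORT A =====
-- A's two inner `while` loops of _parse_md_link have the same shape (open char, close char,
-- collected chars, depth); scanT is that loop, used once with '[' ']' and once with '(' ')'.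
-- Indices are Nat (Python only increments them from 0); chars[i] is read with getD (in range
-- whenever read, exactly as in the Python).
def scanT (cs : List Char) (o c : Char) (i d : Nat) (acc : List Char) :
    Option (List Char × Nat) :=
  if i < cs.length ∧ 0 < d then
    if cs.getD i ' ' = o then scanT cs o c (i + 1) (d + 1) (acc ++ [cs.getD i ' '])
    else if cs.getD i ' ' = c then
      if d - 1 = 0 then some (acc, i)
      else scanT cs o c (i + 1) (d - 1) (acc ++ [cs.getD i ' '])
    else scanT cs o c (i + 1) d (acc ++ [cs.getD i ' '])
  else if d ≠ 0 then none else some (acc, i)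
termination_by cs.length - i
decreasing_by all_goals omega

-- _parse_md_link
def parse_md_link (cs : List Char) (start : Nat) : Option (String × String × Nat) :=
  if start < cs.length ∧ cs.getD start ' ' = '[' then
    match scanT cs '[' ']' (start + 1) 1 [] with
    | none => none
    | some (txt, j) =>
      if j + 1 < cs.length ∧ cs.getD (j + 1) ' ' = '(' then
        match scanT cs '(' ')' (j + 2) 1 [] with
        | none => none
        | some (url, k) => some (String.ofList txt, PySem.Str.strip (String.ofList url), k + 1)
      else none
  else none

-- the main `while i < len(chars)` loop of _convert_images; fuel = len(chars) suffices since i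
-- strictly increases each iteration (fuel is a totality device only)
def convA_loop (cs : List Char) : Nat → Nat → List Char → List Char
  | 0, _, acc => acc
  | fuel + 1, i, acc =>
    if i < cs.length then
      if i + 1 < cs.length ∧ cs.getD i ' ' = '!' ∧ cs.getD (i + 1) ' ' = '[' then
        match parse_md_link cs (i + 1) with
        | some (_, u, e) => convA_loop cs fuel e (acc ++ '<' :: u.toList ++ ['>'])
        | none => convA_loop cs fuel (i + 1) (acc ++ [cs.getD i ' '])
      else convA_loop cs fuel (i + 1) (acc ++ [cs.getD i ' '])
    else acc

def convert_images_py (text : String) : String :=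
  String.ofList (convA_loop text.toList text.toList.length 0 [])

-- ===== PORT B =====
-- `for i, ch in enumerate(text)` building the two stacks and the two match dicts; dicts are
-- association lists with fresh keys prepended (lookup-equivalent to Python dict insertion).
def buildLoop : List Char → Nat → List Nat → List Nat → List (Nat × Nat) → List (Nat × Nat) →
    List (Nat × Nat) × List (Nat × Nat)
  | [], _, _, _, bm, pm => (bm, pm)
  | ch :: l, k, bst, pst, bm, pm =>
    if ch = '[' then buildLoop l (k + 1) (k :: bst) pst bm pm
    else if ch = ']' then
      match bst with
      | q :: bst' => buildLoop l (k + 1) bst' pst ((q, k) :: bm) pm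
      | [] => buildLoop l (k + 1) bst pst bm pm
    else if ch = '(' then buildLoop l (k + 1) bst (k :: pst) bm pm
    else if ch = ')' then
      match pst with
      | q :: pst' => buildLoop l (k + 1) bst pst' bm ((q, k) :: pm)
      | [] => buildLoop l (k + 1) bst pst bm pm
    else buildLoop l (k + 1) bst pst bm pm

-- B's rewrite `while` loop; text[cb+2:cp] has Nat bounds, so the slice is drop/take
def convB_loop (cs : List Char) (bm pm : List (Nat × Nat)) : Nat → Nat → List Char → List Char
  | 0, _, acc => acc
  | fuel + 1, i, acc =>
    if i < cs.length then
      if cs.getD i ' ' = '!' ∧ i + 1 < cs.length ∧ cs.getD (i + 1) ' ' = '[' then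
        match List.lookup (i + 1) bm with
        | some cb =>
          if cb + 1 < cs.length ∧ cs.getD (cb + 1) ' ' = '(' then
            match List.lookup (cb + 1) pm with
            | some cp =>
              convB_loop cs bm pm fuel (cp + 1)
                (acc ++ '<' ::
                  (PySem.Str.strip (String.ofList ((cs.drop (cb + 2)).take (cp - (cb + 2))))).toList
                  ++ ['>'])
            | none => convB_loop cs bm pm fuel (i + 1) (acc ++ [cs.getD i ' '])
          else convB_loop cs bm pm fuel (i + 1) (acc ++ [cs.getD i ' '])
        | none => convB_loop cs bm pm fuel (i + 1) (acc ++ [cs.getD i ' '])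
      else convB_loop cs bm pm fuel (i + 1) (acc ++ [cs.getD i ' '])
    else acc

def convert_images_py_alt (text : String) : String :=
  let cs := text.toList
  let bp := buildLoop cs 0 [] [] [] []
  String.ofList (convB_loop cs bp.1 bp.2 cs.length 0 [])

-- ===== PRECONDITION & SPEC =====
def Spec_convert_images_py (text : String) (out : String) : Prop := out = convert_images_py_alt text
instance (text : String) (out : String) : Decidable (Spec_convert_images_py text out) := by unfold Spec_convert_images_py; infer_instance

-- ===== CLAIM (what is proved, stated in full; the proofs are below) =====
def Claim_equal_convert_images_py : Prop := ∀ (text : String), Dom_convert_images_py text → Spec_convert_images_py text (convert_images_py text)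

-- ===== LEMMAS AND PROOFS =====

-- Pure index version of A's inner scan (drops the collected text); the common interface
-- between A's re-scan and B's precomputed matches.
def scanM (cs : List Char) (o c : Char) (i d : Nat) : Option Nat :=
  if i < cs.length then
    if cs.getD i ' ' = o then scanM cs o c (i + 1) (d + 1)
    else if cs.getD i ' ' = c then
      if d = 1 then some i else scanM cs o c (i + 1) (d - 1)
    else scanM cs o c (i + 1) d
  else none
termination_by cs.length - i
decreasing_by all_goals omega

theorem scanM_some {cs : List Char} {o c : Char} {i d j : Nat}
    (h : scanM cs o c i d = some j) : i ≤ j ∧ j < cs.length ∧ cs.getD j ' ' = c := by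
  fun_induction scanM cs o c i d with
  | case1 i d hi ho ih => obtain ⟨h1, h2, h3⟩ := ih h; exact ⟨by omega, h2, h3⟩
  | case2 i hi ho hc => simp only [Option.some.injEq] at h; subst h; exact ⟨le_refl _, hi, hc⟩
  | case3 i d h1 h2 h3 h4 ih => obtain ⟨g1, g2, g3⟩ := ih h; exact ⟨by omega, g2, g3⟩
  | case4 i d h1 h2 h3 ih => obtain ⟨g1, g2, g3⟩ := ih h; exact ⟨by omega, g2, g3⟩
  | case5 i d h1 => simp at h

theorem seg_cons {cs : List Char} {i j : Nat} (hi : i < cs.length) (hij : i < j) :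
    (cs.drop i).take (j - i) = cs.getD i ' ' :: (cs.drop (i + 1)).take (j - (i + 1)) := by
  rw [List.drop_eq_getElem_cons hi, List.getD_eq_getElem cs ' ' hi]
  have : j - i = (j - (i + 1)) + 1 := by omega
  rw [this, List.take_succ_cons]

theorem scanT_eq {cs : List Char} {o c : Char} : ∀ {i d : Nat} (acc : List Char), 0 < d →
    scanT cs o c i d acc =
      (scanM cs o c i d).map (fun j => (acc ++ (cs.drop i).take (j - i), j)) := by
  intro i d
  fun_induction scanM cs o c i d with
  | case1 i d hi ho ih =>
    intro acc hd
    rw [scanT, if_pos ⟨hi, hd⟩, if_pos ho, ih (acc ++ [cs.getD i ' ']) (by omega)]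
    cases hs : scanM cs o c (i + 1) (d + 1) with
    | none => simp
    | some j =>
      have hj := scanM_some hs
      simp only [Option.map_some, Option.some.injEq, Prod.mk.injEq]
      rw [seg_cons hi (by omega)]
      simp
  | case2 i hi ho hc =>
    intro acc hd
    rw [scanT, if_pos ⟨hi, hd⟩, if_neg ho, if_pos hc, if_pos (by omega : 1 - 1 = 0)]
    simp
  | case3 i d h1 h2 h3 h4 ih =>
    intro acc hd1
    rw [scanT, if_pos ⟨h1, hd1⟩, if_neg h2, if_pos h3, if_neg (by omega : ¬ d - 1 = 0),
      ih (acc ++ [cs.getD i ' ']) (by omega)]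
    cases hs : scanM cs o c (i + 1) (d - 1) with
    | none => simp
    | some j =>
      have hj := scanM_some hs
      simp only [Option.map_some, Option.some.injEq, Prod.mk.injEq]
      rw [seg_cons h1 (by omega)]
      simp
  | case4 i d h1 h2 h3 ih =>
    intro acc hd
    rw [scanT, if_pos ⟨h1, hd⟩, if_neg h2, if_neg h3, ih (acc ++ [cs.getD i ' ']) hd]
    cases hs : scanM cs o c (i + 1) d with
    | none => simp
    | some j =>
      have hj := scanM_some hs
      simp only [Option.map_some, Option.some.injEq, Prod.mk.injEq]
      rw [seg_cons h1 (by omega)]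
      simp
  | case5 i d h1 =>
    intro acc hd
    rw [scanT, if_neg (by omega : ¬ (i < cs.length ∧ 0 < d)), if_pos (by omega : d ≠ 0)]
    simp

-- The generic one-symbol-pair projection of buildLoop.
def mLoop (o c : Char) : List Char → Nat → List Nat → List (Nat × Nat) → List (Nat × Nat)
  | [], _, _, m => m
  | ch :: l, k, st, m =>
    if ch = o then mLoop o c l (k + 1) (k :: st) m
    else if ch = c then
      match st with
      | q :: st' => mLoop o c l (k + 1) st' ((q, k) :: m)
      | [] => mLoop o c l (k + 1) st m
    else mLoop o c l (k + 1) st m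

theorem buildLoop_eq : ∀ (l : List Char) (k : Nat) (bst pst : List Nat)
    (bm pm : List (Nat × Nat)),
    buildLoop l k bst pst bm pm = (mLoop '[' ']' l k bst bm, mLoop '(' ')' l k pst pm) := by
  intro l
  induction l with
  | nil => intros; rfl
  | cons ch l ih =>
    intro k bst pst bm pm
    by_cases h1 : ch = '['
    · simp [buildLoop, mLoop, h1, ih]
    by_cases h2 : ch = ']'
    · cases bst <;> simp [buildLoop, mLoop, h1, h2, ih]
    by_cases h3 : ch = '('
    · simp [buildLoop, mLoop, h2, h3, ih]
    by_cases h4 : ch = ')'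
    · cases pst <;> simp [buildLoop, mLoop, h3, h4, ih]
    simp [buildLoop, mLoop, h1, h2, h3, h4, ih]

-- Invariant of the stack pass after processing cs[0:k): the stack holds the still-open
-- positions (the scan from the j-th entry is exactly in state (k, j+1)), and the map already
-- holds the full scan result for every closed opener.
def StInv (cs : List Char) (o c : Char) (k : Nat) (st : List Nat) (m : List (Nat × Nat)) : Prop :=
  (∀ j q, st[j]? = some q →
      q < k ∧ cs.getD q ' ' = o ∧ scanM cs o c (q + 1) 1 = scanM cs o c k (j + 1)) ∧
  (∀ q, q ∈ st → List.lookup q m = none) ∧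
  (∀ q, q < k → cs.getD q ' ' = o → q ∉ st → List.lookup q m = scanM cs o c (q + 1) 1) ∧
  (∀ q, ¬(q < k ∧ cs.getD q ' ' = o) → List.lookup q m = none)

theorem scanM_none_of_ge {cs : List Char} {o c : Char} {k d : Nat} (h : ¬ k < cs.length) :
    scanM cs o c k d = none := by rw [scanM, if_neg h]

theorem stinv_push {cs : List Char} {o c : Char} {k : Nat} {st : List Nat}
    {m : List (Nat × Nat)} (hk : k < cs.length) (ho : cs.getD k ' ' = o)
    (h : StInv cs o c k st m) : StInv cs o c (k + 1) (k :: st) m := by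
  obtain ⟨ha, hb, hc, hd⟩ := h
  have hstep : ∀ d, scanM cs o c k d = scanM cs o c (k + 1) (d + 1) := by
    intro d; rw [scanM, if_pos hk, if_pos ho]
  refine ⟨?_, ?_, ?_, ?_⟩
  · intro j q hj
    match j with
    | 0 =>
      simp only [List.getElem?_cons_zero, Option.some.injEq] at hj
      subst hj; exact ⟨by omega, ho, rfl⟩
    | j + 1 =>
      simp only [List.getElem?_cons_succ] at hj
      obtain ⟨h1, h2, h3⟩ := ha j q hj
      refine ⟨by omega, h2, ?_⟩
      rw [h3, hstep]
  · intro q hq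
    rcases List.mem_cons.mp hq with h | h
    · rw [h]; exact hd k (fun hh => absurd hh.1 (Nat.lt_irrefl k))
    · exact hb q h
  · intro q hq1 hq2 hq3
    have hne : q ≠ k := fun h => hq3 (h ▸ List.mem_cons_self)
    exact hc q (by omega) hq2 (fun h => hq3 (List.mem_cons_of_mem _ h))
  · intro q hq
    exact hd q (by intro ⟨h1, h2⟩; exact hq ⟨by omega, h2⟩)

theorem stinv_pop {cs : List Char} {o c : Char} {k : Nat} {q : Nat} {st : List Nat}
    {m : List (Nat × Nat)} (hoc : o ≠ c) (hk : k < cs.length) (hcc : cs.getD k ' ' = c)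
    (hnd : (q :: st).Pairwise (fun a b => b < a))
    (h : StInv cs o c k (q :: st) m) : StInv cs o c (k + 1) st ((q, k) :: m) := by
  obtain ⟨ha, hb, hc, hd⟩ := h
  have hno : ¬ cs.getD k ' ' = o := by rw [hcc]; exact fun h => hoc h.symm
  have hq0 := ha 0 q (by simp)
  have hqscan : scanM cs o c (q + 1) 1 = some k := by
    rw [hq0.2.2, scanM, if_pos hk, if_neg hno, if_pos hcc, if_pos rfl]
  have hstep : ∀ d, d ≠ 1 → scanM cs o c k d = scanM cs o c (k + 1) (d - 1) := by
    intro d hd; rw [scanM, if_pos hk, if_neg hno, if_pos hcc, if_neg hd]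
  refine ⟨?_, ?_, ?_, ?_⟩
  · intro j q' hj
    obtain ⟨h1, h2, h3⟩ := ha (j + 1) q' (by simpa using hj)
    refine ⟨by omega, h2, ?_⟩
    rw [h3, hstep (j + 2) (by omega)]
    norm_num
  · intro q' hq'
    have hlt : q' < q := (List.pairwise_cons.mp hnd).1 q' hq'
    have hne : (q' == q) = false := by simp; omega
    simp only [List.lookup, hne]
    exact hb q' (List.mem_cons_of_mem _ hq')
  · intro q' hq1 hq2 hq3
    by_cases hqq : q' = q
    · subst hqq
      simp only [List.lookup, BEq.rfl]
      exact hqscan.symm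
    · have hne : (q' == q) = false := by simp [hqq]
      simp only [List.lookup, hne]
      have hq'lt : q' < k := by
        rcases Nat.lt_or_ge q' k with h | h
        · exact h
        · have : q' = k := by omega
          rw [this] at hq2; exact absurd hq2 hno
      exact hc q' hq'lt hq2 (by
        intro hmem
        rcases List.mem_cons.mp hmem with h | h
        · exact hqq h
        · exact hq3 h)
  · intro q' hq'
    have hne : q' ≠ q := by
      intro h; subst h
      exact hq' ⟨by omega, hq0.2.1⟩
    have hne' : (q' == q) = false := by simp [hne]
    simp only [List.lookup, hne']
    exact hd q' (by intro ⟨h1, h2⟩; exact hq' ⟨by omega, h2⟩)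

theorem stinv_pop_nil {cs : List Char} {o c : Char} {k : Nat}
    {m : List (Nat × Nat)} (hoc : o ≠ c) (_hk : k < cs.length) (hcc : cs.getD k ' ' = c)
    (h : StInv cs o c k [] m) : StInv cs o c (k + 1) [] m := by
  obtain ⟨ha, hb, hc, hd⟩ := h
  have hno : ¬ cs.getD k ' ' = o := by rw [hcc]; exact fun h => hoc h.symm
  refine ⟨by simp, by simp, ?_, ?_⟩
  · intro q hq1 hq2 hq3
    have : q < k := by
      rcases Nat.lt_or_ge q k with h | h
      · exact h
      · have : q = k := by omega
        rw [this] at hq2; exact absurd hq2 hno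
    exact hc q this hq2 (by simp)
  · intro q hq
    exact hd q (by intro ⟨h1, h2⟩; exact hq ⟨by omega, h2⟩)

theorem stinv_skip {cs : List Char} {o c : Char} {k : Nat} {st : List Nat}
    {m : List (Nat × Nat)} (hk : k < cs.length) (hno : ¬ cs.getD k ' ' = o)
    (hnc : ¬ cs.getD k ' ' = c) (h : StInv cs o c k st m) : StInv cs o c (k + 1) st m := by
  obtain ⟨ha, hb, hc, hd⟩ := h
  have hstep : ∀ d, scanM cs o c k d = scanM cs o c (k + 1) d := by
    intro d; rw [scanM, if_pos hk, if_neg hno, if_neg hnc]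
  refine ⟨?_, hb, ?_, ?_⟩
  · intro j q hj
    obtain ⟨h1, h2, h3⟩ := ha j q hj
    exact ⟨by omega, h2, by rw [h3, hstep]⟩
  · intro q hq1 hq2 hq3
    have : q < k := by
      rcases Nat.lt_or_ge q k with h | h
      · exact h
      · have : q = k := by omega
        rw [this] at hq2; exact absurd hq2 hno
    exact hc q this hq2 hq3
  · intro q hq
    exact hd q (by intro ⟨h1, h2⟩; exact hq ⟨by omega, h2⟩)

theorem st_lt_of_inv {cs : List Char} {o c : Char} {k : Nat} {st : List Nat}
    {m : List (Nat × Nat)} (h : StInv cs o c k st m) : ∀ q ∈ st, q < k := by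
  intro q hq
  obtain ⟨j, hj, hget⟩ := List.getElem_of_mem hq
  exact (h.1 j q (by rw [List.getElem?_eq_getElem hj]; exact congrArg some hget)).1

theorem mLoop_main {cs : List Char} {o c : Char} (hoc : o ≠ c) :
    ∀ (l : List Char) (k : Nat) (st : List Nat) (m : List (Nat × Nat)),
    cs.drop k = l → StInv cs o c k st m → st.Pairwise (fun a b => b < a) →
    ∀ q, q < cs.length → cs.getD q ' ' = o →
      List.lookup q (mLoop o c l k st m) = scanM cs o c (q + 1) 1 := by
  intro l
  induction l with
  | nil =>
    intro k st m hdrop hinv hnd q hq ho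
    have hk : cs.length ≤ k := by
      have := congrArg List.length hdrop
      simp at this; omega
    obtain ⟨ha, hb, hc, hd⟩ := hinv
    simp only [mLoop]
    by_cases hmem : q ∈ st
    · obtain ⟨j, hj, hget⟩ := List.getElem_of_mem hmem
      have h3 := (ha j q (by rw [List.getElem?_eq_getElem hj]; exact congrArg some hget)).2.2
      rw [hb q hmem, h3, scanM_none_of_ge (by omega)]
    · exact hc q (by omega) ho hmem
  | cons ch l ih =>
    intro k st m hdrop hinv hnd q hq ho
    have hk : k < cs.length := by
      have := congrArg List.length hdrop
      simp at this; omega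
    have hdrop' : cs.drop k = cs[k] :: cs.drop (k + 1) := List.drop_eq_getElem_cons hk
    rw [hdrop] at hdrop'
    have hch : ch = cs.getD k ' ' := by
      rw [List.getD_eq_getElem cs ' ' hk]
      exact (List.cons_eq_cons.mp hdrop').1
    have htail : cs.drop (k + 1) = l := ((List.cons_eq_cons.mp hdrop').2).symm
    have hstlt := st_lt_of_inv hinv
    by_cases h1 : ch = o
    · simp only [mLoop]
      rw [if_pos h1]
      exact ih (k + 1) (k :: st) m htail (stinv_push hk (hch ▸ h1) hinv)
        (List.pairwise_cons.mpr ⟨hstlt, hnd⟩) q hq ho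
    by_cases h2 : ch = c
    · simp only [mLoop]
      rw [if_neg h1, if_pos h2]
      cases st with
      | nil =>
        exact ih (k + 1) [] m htail (stinv_pop_nil hoc hk (hch ▸ h2) hinv) (by simp) q hq ho
      | cons q' st' =>
        exact ih (k + 1) st' ((q', k) :: m) htail (stinv_pop hoc hk (hch ▸ h2) hnd hinv)
          (List.Pairwise.of_cons hnd) q hq ho
    · simp only [mLoop]
      rw [if_neg h1, if_neg h2]
      exact ih (k + 1) st m htail
        (stinv_skip hk (fun h => h1 (hch ▸ h)) (fun h => h2 (hch ▸ h)) hinv) hnd q hq ho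

theorem stinv_init (cs : List Char) (o c : Char) : StInv cs o c 0 [] [] := by
  refine ⟨by simp, by simp, by omega, by intros; rfl⟩

theorem match_final {cs : List Char} {o c : Char} (hoc : o ≠ c) :
    ∀ q, q < cs.length → cs.getD q ' ' = o →
      List.lookup q (mLoop o c cs 0 [] []) = scanM cs o c (q + 1) 1 :=
  mLoop_main hoc cs 0 [] [] (by simp) (stinv_init cs o c) (by simp)

-- The two rewrite loops agree step for step once the lookups are known to equal A's scans.
theorem loops_eq {cs : List Char} {bm pm : List (Nat × Nat)}
    (hbm : ∀ q, q < cs.length → cs.getD q ' ' = '[' →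
      List.lookup q bm = scanM cs '[' ']' (q + 1) 1)
    (hpm : ∀ q, q < cs.length → cs.getD q ' ' = '(' →
      List.lookup q pm = scanM cs '(' ')' (q + 1) 1) :
    ∀ (fuel i : Nat) (acc : List Char),
      convA_loop cs fuel i acc = convB_loop cs bm pm fuel i acc := by
  intro fuel
  induction fuel with
  | zero => intros; rfl
  | succ fuel ih =>
    intro i acc
    rw [convA_loop, convB_loop]
    by_cases hi : i < cs.length
    · rw [if_pos hi, if_pos hi]
      by_cases hcond : i + 1 < cs.length ∧ cs.getD i ' ' = '!' ∧ cs.getD (i + 1) ' ' = '['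
      · obtain ⟨h1, h2, h3⟩ := hcond
        rw [if_pos ⟨h1, h2, h3⟩, if_pos ⟨h2, h1, h3⟩]
        have hparse : parse_md_link cs (i + 1) =
            match scanT cs '[' ']' (i + 2) 1 [] with
            | none => none
            | some (txt, j) =>
              if j + 1 < cs.length ∧ cs.getD (j + 1) ' ' = '(' then
                match scanT cs '(' ')' (j + 2) 1 [] with
                | none => none
                | some (url, k) =>
                  some (String.ofList txt, PySem.Str.strip (String.ofList url), k + 1)
              else none := by
          rw [parse_md_link, if_pos ⟨h1, h3⟩]
        rw [hparse, scanT_eq [] (by omega), hbm (i + 1) h1 h3]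
        cases hs : scanM cs '[' ']' (i + 2) 1 with
        | none => exact ih (i + 1) (acc ++ [cs.getD i ' '])
        | some j =>
          simp only [Option.map_some]
          by_cases hpar : j + 1 < cs.length ∧ cs.getD (j + 1) ' ' = '('
          · rw [if_pos hpar, if_pos hpar, scanT_eq [] (by omega),
              hpm (j + 1) hpar.1 hpar.2]
            cases hs2 : scanM cs '(' ')' (j + 2) 1 with
            | none => exact ih (i + 1) (acc ++ [cs.getD i ' '])
            | some k =>
              simp only [Option.map_some, List.nil_append]
              exact ih (k + 1) _
          · rw [if_neg hpar, if_neg hpar]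
            exact ih (i + 1) (acc ++ [cs.getD i ' '])
      · have hcond' : ¬ (cs.getD i ' ' = '!' ∧ i + 1 < cs.length ∧ cs.getD (i + 1) ' ' = '[') := by
          tauto
        rw [if_neg hcond, if_neg hcond']
        exact ih (i + 1) (acc ++ [cs.getD i ' '])
    · rw [if_neg hi, if_neg hi]

-- ===== VERDICT (by name: the statement is the Claim_ definition above) =====
theorem convert_images_py_spec : Claim_equal_convert_images_py := by
  intro text _
  have hb := buildLoop_eq text.toList 0 [] [] [] []
  simp only [Spec_convert_images_py, convert_images_py, convert_images_py_alt, hb]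
  exact congrArg String.ofList
    (loops_eq (match_final (by decide)) (match_final (by decide)) text.toList.length 0 [])
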